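-- pv_equiv track=rewrite | github.com/Shawn207/MAPF_exploration | src/single_agent_planner.py | generate_motions_recursive
-- ===== SOURCE A (Python) =====
-- def generate_motions_recursive(num_agents,cur_agent):
--     directions = [(0, -1), (1, 0), (0, 1), (-1, 0), (0, 0)]
--
--     if cur_agent == num_agents:
--         return [()]
--
--     joint_state_motions = []
--
--     for direction in directions:
--         for subsequent_motion in generate_motions_recursive(num_agents, cur_agent + 1):
--             joint_state_motions.append((direction,) + subsequent_motion)
--
--
--     return joint_state_motions
-- ===== SOURCE B (Python) =====
-- def generate_motions_recursive(num_agents, cur_agent):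
--     directions = [(0, -1), (1, 0), (0, 1), (-1, 0), (0, 0)]
--     motions = []
--     for index in range(5 ** (num_agents - cur_agent)):
--         motion = []
--         for _ in range(num_agents - cur_agent):
--             index, digit = divmod(index, 5)
--             motion.append(directions[digit])
--         motions.append(tuple(reversed(motion)))
--     return motions
-- ===== Notes on version B (the rewrite author's own statement) =====
-- stated objective: alternative
-- what changed: Replaces the nested recursion with a closed-form enumeration: each motion index in range(5**k) is decoded as a base-5 number whose digits select the directions.
import Mathlib
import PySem

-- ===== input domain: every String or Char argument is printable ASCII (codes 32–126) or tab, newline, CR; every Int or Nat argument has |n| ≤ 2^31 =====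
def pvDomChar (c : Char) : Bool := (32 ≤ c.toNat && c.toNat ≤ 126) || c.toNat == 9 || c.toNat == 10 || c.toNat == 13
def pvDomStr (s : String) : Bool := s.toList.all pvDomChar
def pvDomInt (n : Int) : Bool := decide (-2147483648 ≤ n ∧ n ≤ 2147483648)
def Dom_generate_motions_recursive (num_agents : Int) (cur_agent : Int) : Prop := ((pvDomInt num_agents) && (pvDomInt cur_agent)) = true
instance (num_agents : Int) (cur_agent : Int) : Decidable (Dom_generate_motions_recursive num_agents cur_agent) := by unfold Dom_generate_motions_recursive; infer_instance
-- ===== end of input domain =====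

-- B replaces A's nested recursion with a closed-form enumeration (each index in
-- range(5^k) decoded as a base-5 digit string selecting directions); objective: alternative.


-- ===== PORT A =====
-- A's recursion, with fuel (num_agents - cur_agent).toNat making it total; the fuel
-- never runs out when cur_agent ≤ num_agents (the inputs Pre_ admits).
def genRecA (num_agents cur_agent : Int) : Nat → List (List (Int × Int))
  | 0 =>
    if cur_agent = num_agents then [[]]
    else []   -- unreachable under Pre_ (Python diverges when cur_agent > num_agents)
  | fuel + 1 =>
    if cur_agent = num_agents then [[]]
    else
        let directions : List (Int × Int) := [(0, -1), (1, 0), (0, 1), (-1, 0), (0, 0)]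
        directions.foldl
          (fun acc direction =>
            (genRecA num_agents (cur_agent + 1) fuel).foldl
              (fun acc2 subsequent_motion => acc2 ++ [direction :: subsequent_motion]) acc)
          []

def generate_motions_recursive (num_agents : Int) (cur_agent : Int) : List (List (Int × Int)) :=
  genRecA num_agents cur_agent (num_agents - cur_agent).toNat

-- ===== PORT B =====
-- the inner loop of Source B: k = num_agents - cur_agent iterations of divmod(index, 5),
-- appending directions[digit], then tuple(reversed(motion)); directions[digit] is exact
-- via pyGetD since 0 ≤ index % 5 < 5 (the default is never read)
def decodeMotionB (directions : List (Int × Int)) (k : Int) (index : Int) : List (Int × Int) :=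
  (((PySem.List.pyRange 0 k 1).foldl
      (fun (st : Int × List (Int × Int)) _ =>
        (PySem.Int.floordiv st.1 5,
         st.2 ++ [PySem.List.pyGetD directions (PySem.Int.mod st.1 5) (0, 0)]))
      (index, [])).2).reverse

-- Python's 5 ** (num_agents - cur_agent) is ported as 5 ^ (…).toNat: for a negative
-- exponent Python raises TypeError in range(), outside Pre_
def generate_motions_recursive_alt (num_agents : Int) (cur_agent : Int) : List (List (Int × Int)) :=
  let directions : List (Int × Int) := [(0, -1), (1, 0), (0, 1), (-1, 0), (0, 0)]
  (PySem.List.pyRange 0 ((5:Int) ^ (num_agents - cur_agent).toNat) 1).foldl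
    (fun motions index => motions ++ [decodeMotionB directions (num_agents - cur_agent) index]) []

-- ===== PRECONDITION & SPEC =====
-- Pre_ excludes cur_agent > num_agents: there Python A recurses without bound
-- (RecursionError) and Python B raises TypeError (5 ** negative is a float in range()).
def Pre_generate_motions_recursive (num_agents : Int) (cur_agent : Int) : Prop :=
  cur_agent ≤ num_agents
instance (num_agents : Int) (cur_agent : Int) : Decidable (Pre_generate_motions_recursive num_agents cur_agent) := by unfold Pre_generate_motions_recursive; infer_instance
def pvWitness_generate_motions_recursive : Int × Int := (2, 0)

def Spec_generate_motions_recursive (num_agents : Int) (cur_agent : Int) (out : List (List (Int × Int))) : Prop := out = generate_motions_recursive_alt num_agents cur_agent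
instance (num_agents : Int) (cur_agent : Int) (out : List (List (Int × Int))) : Decidable (Spec_generate_motions_recursive num_agents cur_agent out) := by unfold Spec_generate_motions_recursive; infer_instance

-- ===== CLAIM (what is proved, stated in full; the proofs are below) =====
def Claim_equal_generate_motions_recursive : Prop := ∀ (num_agents : Int) (cur_agent : Int), Dom_generate_motions_recursive num_agents cur_agent → Pre_generate_motions_recursive num_agents cur_agent → Spec_generate_motions_recursive num_agents cur_agent (generate_motions_recursive num_agents cur_agent)

-- ===== LEMMAS AND PROOFS =====

def pvDirs : List (Int × Int) := [(0, -1), (1, 0), (0, 1), (-1, 0), (0, 0)]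

def pvStep (res : List (List (Int × Int))) : List (List (Int × Int)) :=
  pvDirs.flatMap (fun d => res.map (fun r => d :: r))

-- the base-5 digit string of index, least-significant first, as direction entries
def pvPeel : Nat → Int → List (Int × Int)
  | 0, _ => []
  | k + 1, i =>
      PySem.List.pyGetD pvDirs (PySem.Int.mod i 5) (0, 0) :: pvPeel k (PySem.Int.floordiv i 5)

theorem foldl_push_map {α β : Type} (xs : List α) (f : α → β) :
    ∀ acc : List β, xs.foldl (fun a x => a ++ [f x]) acc = acc ++ xs.map f := by
  induction xs with
  | nil => intro acc; simp
  | cons x xs ih => intro acc; simp [ih]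

theorem foldl_append_flatMap {α β : Type} (xs : List α) (g : α → List β) :
    ∀ acc : List β, xs.foldl (fun a x => a ++ g x) acc = acc ++ xs.flatMap g := by
  induction xs with
  | nil => intro acc; simp
  | cons x xs ih => intro acc; simp [ih]

theorem genRecA_eq_iterate (k : Nat) : ∀ (n c : Int), n = c + k →
    genRecA n c k = pvStep^[k] [[]] := by
  induction k with
  | zero => intro n c h; simp [genRecA, h]
  | succ k ih =>
    intro n c h
    have hne : c ≠ n := by omega
    have hrec := ih n (c + 1) (by omega)
    simp only [genRecA, if_neg hne, hrec]
    rw [Function.iterate_succ_apply']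
    have h1 : ∀ (d : Int × Int) acc2,
        (pvStep^[k] [[]]).foldl (fun a2 s => a2 ++ [d :: s]) acc2
          = acc2 ++ (pvStep^[k] [[]]).map (fun s => d :: s) :=
      fun d acc2 => foldl_push_map _ _ acc2
    have hfun : (fun (acc : List (List (Int × Int))) (d : Int × Int) =>
            (pvStep^[k] [[]]).foldl (fun a2 s => a2 ++ [d :: s]) acc)
          = fun acc d => acc ++ (pvStep^[k] [[]]).map (fun s => d :: s) := by
      funext acc d; exact h1 d acc
    calc pvDirs.foldl (fun acc d =>
            (pvStep^[k] [[]]).foldl (fun a2 s => a2 ++ [d :: s]) acc) []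
        = pvDirs.foldl (fun acc d => acc ++ (pvStep^[k] [[]]).map (fun s => d :: s)) [] := by
          rw [hfun]
      _ = [] ++ pvDirs.flatMap (fun d => (pvStep^[k] [[]]).map (fun s => d :: s)) :=
          foldl_append_flatMap _ _ []
      _ = pvStep (pvStep^[k] [[]]) := by simp [pvStep]

theorem foldl_const_iterate {α β : Type} (xs : List α) (f : β → β) :
    ∀ init : β, xs.foldl (fun b _ => f b) init = f^[xs.length] init := by
  induction xs with
  | nil => intro init; simp
  | cons x xs ih => intro init; simp [ih, Function.iterate_succ_apply]

-- the inner-loop state function of decodeMotionB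
def pvF (st : Int × List (Int × Int)) : Int × List (Int × Int) :=
  (PySem.Int.floordiv st.1 5,
   st.2 ++ [PySem.List.pyGetD pvDirs (PySem.Int.mod st.1 5) (0, 0)])

theorem iterate_pvF (k : Nat) : ∀ (i : Int) (acc : List (Int × Int)),
    (pvF^[k] (i, acc)).2 = acc ++ pvPeel k i := by
  induction k with
  | zero => intro i acc; simp [pvPeel]
  | succ k ih =>
    intro i acc
    rw [Function.iterate_succ_apply]
    show (pvF^[k] (pvF (i, acc))).2 = acc ++ pvPeel (k + 1) i
    simp [pvF, ih, pvPeel]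

theorem decodeMotionB_eq (m i : Int) :
    decodeMotionB pvDirs m i = (pvPeel m.toNat i).reverse := by
  unfold decodeMotionB
  rw [show (fun (st : Int × List (Int × Int)) (_ : Int) =>
        (PySem.Int.floordiv st.1 5,
         st.2 ++ [PySem.List.pyGetD pvDirs (PySem.Int.mod st.1 5) (0, 0)])) = fun st _ => pvF st
      from rfl]
  rw [foldl_const_iterate (PySem.List.pyRange 0 m 1) pvF (i, [])]
  rw [PySem.List.length_pyRange_one]
  rw [iterate_pvF]
  simp

theorem pvPeel_split (k : Nat) : ∀ (d r : Int), 0 ≤ d → d < 5 → 0 ≤ r → r < (5:Int) ^ k →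
    pvPeel (k + 1) (d * 5 ^ k + r) = pvPeel k r ++ [PySem.List.pyGetD pvDirs d (0, 0)] := by
  induction k with
  | zero =>
    intro d r hd0 hd5 hr0 hr1
    have hr : r = 0 := by omega
    subst hr
    simp only [pvPeel, pow_zero, mul_one, add_zero, List.nil_append]
    have hm : PySem.Int.mod d 5 = d := by
      rw [PySem.Int.mod_eq_emod_of_pos (by norm_num : (0:Int) < 5)]; omega
    rw [hm]
  | succ k ih =>
    intro d r hd0 hd5 hr0 hr1
    have hP : (0:Int) < 5 ^ k := by positivity
    have hpow : (5:Int) ^ (k + 1) = 5 ^ k * 5 := pow_succ 5 k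
    have hx : d * 5 ^ (k + 1) + r = r + d * 5 ^ k * 5 := by rw [hpow]; ring
    have hmod : PySem.Int.mod (d * 5 ^ (k + 1) + r) 5 = PySem.Int.mod r 5 := by
      rw [PySem.Int.mod_eq_emod_of_pos (by norm_num : (0:Int) < 5),
          PySem.Int.mod_eq_emod_of_pos (by norm_num : (0:Int) < 5), hx]
      generalize d * 5 ^ k = q
      omega
    have hdiv : PySem.Int.floordiv (d * 5 ^ (k + 1) + r) 5 = d * 5 ^ k + PySem.Int.floordiv r 5 := by
      rw [PySem.Int.floordiv_eq_ediv_of_pos (by norm_num : (0:Int) < 5),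
          PySem.Int.floordiv_eq_ediv_of_pos (by norm_num : (0:Int) < 5), hx]
      generalize d * 5 ^ k = q
      omega
    have hq0 : 0 ≤ PySem.Int.floordiv r 5 := by
      rw [PySem.Int.floordiv_eq_ediv_of_pos (by norm_num : (0:Int) < 5)]
      exact Int.ediv_nonneg hr0 (by norm_num)
    have hq1 : PySem.Int.floordiv r 5 < 5 ^ k := by
      rw [PySem.Int.floordiv_eq_ediv_of_pos (by norm_num : (0:Int) < 5)]
      have : r < 5 ^ k * 5 := by rw [← hpow]; exact hr1
      omega
    have lhs : pvPeel (k + 1 + 1) (d * 5 ^ (k + 1) + r)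
        = PySem.List.pyGetD pvDirs (PySem.Int.mod r 5) (0, 0)
          :: pvPeel (k + 1) (d * 5 ^ k + PySem.Int.floordiv r 5) := by
      rw [pvPeel, hmod, hdiv]
    rw [lhs, ih d (PySem.Int.floordiv r 5) hd0 hd5 hq0 hq1]
    rw [show pvPeel (k + 1) r
          = PySem.List.pyGetD pvDirs (PySem.Int.mod r 5) (0, 0) :: pvPeel k (PySem.Int.floordiv r 5)
        from rfl]
    simp

-- one contiguous block of indices, shifted to start at 0
theorem block_map {α : Type} (a P : Int) (g : Int → α) :
    (PySem.List.pyRange a (a + P) 1).map g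
      = (PySem.List.pyRange 0 P 1).map (fun r => g (a + r)) := by
  rw [PySem.List.pyRange_one, PySem.List.pyRange_one]
  simp [List.map_map, Function.comp_def, add_sub_cancel_left]

theorem mapRange_eq (k : Nat) :
    (PySem.List.pyRange 0 ((5:Int) ^ k) 1).map (fun i => (pvPeel k i).reverse)
      = pvStep^[k] [[]] := by
  induction k with
  | zero =>
    rw [show ((5:Int) ^ 0) = 0 + 1 by norm_num, PySem.List.pyRange_one_singleton]
    simp [pvPeel]
  | succ k ih =>
    have hP : (0:Int) < 5 ^ k := by positivity
    set P : Int := 5 ^ k with hPdef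
    have hpow : (5:Int) ^ (k + 1) = P * 5 := pow_succ 5 k
    have hblock : ∀ d : Int, 0 ≤ d → d < 5 →
        (PySem.List.pyRange (d * P) (d * P + P) 1).map (fun i => (pvPeel (k + 1) i).reverse)
          = (pvStep^[k] [[]]).map (fun s => PySem.List.pyGetD pvDirs d (0, 0) :: s) := by
      intro d hd0 hd5
      rw [block_map]
      have hcong : ∀ r ∈ PySem.List.pyRange 0 P 1,
          (pvPeel (k + 1) (d * P + r)).reverse
            = PySem.List.pyGetD pvDirs d (0, 0) :: (pvPeel k r).reverse := by
        intro r hr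
        rw [PySem.List.mem_pyRange_one] at hr
        rw [hPdef] at hr ⊢
        rw [pvPeel_split k d r hd0 hd5 hr.1 hr.2]
        simp
      rw [List.map_congr_left hcong, ← ih]
      simp [List.map_map, Function.comp_def]
    have hsplit : PySem.List.pyRange 0 (P * 5) 1
        = PySem.List.pyRange 0 P 1 ++ PySem.List.pyRange P (2 * P) 1
          ++ PySem.List.pyRange (2 * P) (3 * P) 1 ++ PySem.List.pyRange (3 * P) (4 * P) 1
          ++ PySem.List.pyRange (4 * P) (5 * P) 1 := by
      rw [show (5:Int) * P = P * 5 by ring] at *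
      rw [PySem.List.pyRange_one_append 0 P (P * 5) (by omega) (by nlinarith),
          PySem.List.pyRange_one_append P (2 * P) (P * 5) (by omega) (by nlinarith),
          PySem.List.pyRange_one_append (2 * P) (3 * P) (P * 5) (by omega) (by nlinarith),
          PySem.List.pyRange_one_append (3 * P) (4 * P) (P * 5) (by omega) (by nlinarith)]
      simp [List.append_assoc]
    have hone : ∀ d : Int, 0 ≤ d → d < 5 →
        (PySem.List.pyRange (d * P) ((d + 1) * P) 1).map (fun i => (pvPeel (k + 1) i).reverse)
          = (pvStep^[k] [[]]).map (fun s => PySem.List.pyGetD pvDirs d (0, 0) :: s) := by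
      intro d hd0 hd5
      rw [show (d + 1) * P = d * P + P by ring]
      exact hblock d hd0 hd5
    rw [hpow, hsplit]
    rw [List.map_append, List.map_append, List.map_append, List.map_append]
    rw [show PySem.List.pyRange 0 P 1 = PySem.List.pyRange ((0:Int) * P) (((0:Int) + 1) * P) 1 by norm_num,
        show PySem.List.pyRange P (2 * P) 1 = PySem.List.pyRange ((1:Int) * P) (((1:Int) + 1) * P) 1 by norm_num,
        show PySem.List.pyRange (2 * P) (3 * P) 1 = PySem.List.pyRange ((2:Int) * P) (((2:Int) + 1) * P) 1 by norm_num,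
        show PySem.List.pyRange (3 * P) (4 * P) 1 = PySem.List.pyRange ((3:Int) * P) (((3:Int) + 1) * P) 1 by norm_num,
        show PySem.List.pyRange (4 * P) (5 * P) 1 = PySem.List.pyRange ((4:Int) * P) (((4:Int) + 1) * P) 1 by norm_num]
    rw [hone 0 (by norm_num) (by norm_num), hone 1 (by norm_num) (by norm_num),
        hone 2 (by norm_num) (by norm_num), hone 3 (by norm_num) (by norm_num),
        hone 4 (by norm_num) (by norm_num)]
    rw [Function.iterate_succ_apply']
    have hd0 : PySem.List.pyGetD pvDirs 0 (0, 0) = ((0:Int), (-1:Int)) := by decide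
    have hd1 : PySem.List.pyGetD pvDirs 1 (0, 0) = ((1:Int), (0:Int)) := by decide
    have hd2 : PySem.List.pyGetD pvDirs 2 (0, 0) = ((0:Int), (1:Int)) := by decide
    have hd3 : PySem.List.pyGetD pvDirs 3 (0, 0) = ((-1:Int), (0:Int)) := by decide
    have hd4 : PySem.List.pyGetD pvDirs 4 (0, 0) = ((0:Int), (0:Int)) := by decide
    rw [hd0, hd1, hd2, hd3, hd4]
    simp [pvStep, pvDirs]

-- ===== VERDICT (by name: the statement is the Claim_ definition above) =====
theorem generate_motions_recursive_spec : Claim_equal_generate_motions_recursive := by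
  intro n c _ hpre
  unfold Spec_generate_motions_recursive generate_motions_recursive generate_motions_recursive_alt
  have hk : n = c + ((n - c).toNat : Int) := by
    have : (0:Int) ≤ n - c := sub_nonneg.mpr hpre
    omega
  rw [genRecA_eq_iterate _ n c hk]
  rw [foldl_push_map (PySem.List.pyRange 0 ((5:Int) ^ (n - c).toNat) 1)
        (decodeMotionB [(0, -1), (1, 0), (0, 1), (-1, 0), (0, 0)] (n - c)) []]
  rw [show ([((0:Int), (-1:Int)), (1, 0), (0, 1), (-1, 0), (0, 0)] : List (Int × Int)) = pvDirs from rfl]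
  rw [show (PySem.List.pyRange 0 ((5:Int) ^ (n - c).toNat) 1).map (decodeMotionB pvDirs (n - c))
        = (PySem.List.pyRange 0 ((5:Int) ^ (n - c).toNat) 1).map (fun i => (pvPeel (n - c).toNat i).reverse)
      from List.map_congr_left (fun i _ => decodeMotionB_eq (n - c) i)]
  rw [mapRange_eq]
  simp
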